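-- pv_equiv track=rewrite | github.com/hivaLab/ai_cae_meshing | src/cae_mesh_common/cad/step_io.py | _cad_template
-- ===== SOURCE A (Python) =====
-- from typing import Any
--
-- FEATURE_SYNTHETIC_TEMPLATES = {
--     "plastic_base",
--     "ribbed_cover",
--     "sheet_metal_box",
--     "bracket",
--     "screw",
--     "motor_dummy",
--     "pcb_dummy",
-- }
--
-- def _cad_template(part: dict[str, Any]) -> str:
--     explicit = part.get("cad_template")
--     if explicit:
--         return str(explicit)
--     name = str(part.get("name") or "")
--     for template in sorted(FEATURE_SYNTHETIC_TEMPLATES, key=len, reverse=True):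
--         if name == template or name.startswith(f"{template}_"):
--             return template
--     return name
-- ===== SOURCE B (Python) =====
-- from typing import Any
--
-- FEATURE_SYNTHETIC_TEMPLATES = {
--     "plastic_base",
--     "ribbed_cover",
--     "sheet_metal_box",
--     "bracket",
--     "screw",
--     "motor_dummy",
--     "pcb_dummy",
-- }
--
-- def _cad_template(part: dict[str, Any]) -> str:
--     explicit = part.get("cad_template")
--     if explicit:
--         return str(explicit)
--     name = str(part.get("name") or "")
--     tokens = name.split("_")
--     for k in range(len(tokens), 0, -1):
--         candidate = "_".join(tokens[:k])
--         if candidate in FEATURE_SYNTHETIC_TEMPLATES: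
--             return candidate
--     return name
-- ===== Notes on version B (the rewrite author's own statement) =====
-- stated objective: alternative
-- what changed: Instead of scanning the template set sorted by length and testing name==t or name.startswith(t+'_') for each template, B splits the name on '_' and probes its underscore-bounded prefixes longest-first with a set membership test, returning the first prefix that is a template.
import Mathlib
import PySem

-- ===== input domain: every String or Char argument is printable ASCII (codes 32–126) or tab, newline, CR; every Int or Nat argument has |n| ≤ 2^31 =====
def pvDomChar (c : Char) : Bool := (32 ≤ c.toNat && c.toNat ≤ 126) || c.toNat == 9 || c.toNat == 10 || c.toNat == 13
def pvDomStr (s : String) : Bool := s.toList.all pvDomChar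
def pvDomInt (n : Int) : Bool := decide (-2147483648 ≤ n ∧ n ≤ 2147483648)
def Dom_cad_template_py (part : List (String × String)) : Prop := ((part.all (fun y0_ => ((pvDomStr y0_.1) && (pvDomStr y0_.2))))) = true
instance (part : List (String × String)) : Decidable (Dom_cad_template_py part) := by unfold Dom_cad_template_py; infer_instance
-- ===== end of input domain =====

-- B replaces A's scan over the length-sorted template set (name == t or name.startswith(t+"_"))
-- by splitting the name on '_' and probing its underscore-bounded prefixes longest-first
-- against the template set; same return value, similar cost ("alternative").

-- ===== PORT A =====
-- FEATURE_SYNTHETIC_TEMPLATES as A iterates it: sorted(set, key=len, reverse=True) (CPython order; ties cannot both match one name)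
def pvTemplatesByLen : List String :=
  ["sheet_metal_box", "plastic_base", "ribbed_cover", "motor_dummy", "pcb_dummy", "bracket", "screw"]

-- the 'for template in …: if name == template or name.startswith(f"{template}_"): return template' loop; falls through to 'return name'
def pvAScan (name : String) : List String → String
  | [] => name
  | t :: ts =>
    if name = t ∨ PySem.Str.startswith name (t ++ "_") then t else pvAScan name ts

def cad_template_py (part : List (String × String)) : String :=
  -- 'explicit = part.get("cad_template"); if explicit: return str(explicit)' — values are str, truthy = nonempty
  let explicit := (PySem.Dict.get? ⟨part⟩ "cad_template").getD ""
  if explicit ≠ "" then explicit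
  else
    let name := (PySem.Dict.get? ⟨part⟩ "name").getD ""
    pvAScan name pvTemplatesByLen

-- ===== PORT B =====
def pvTemplateSet : PySem.Set String :=
  PySem.Set.ofList ["plastic_base", "ribbed_cover", "sheet_metal_box", "bracket", "screw", "motor_dummy", "pcb_dummy"]

-- 'for k in range(len(tokens), 0, -1): candidate = "_".join(tokens[:k]); if candidate in …: return candidate'
def pvBScan (tokens : List String) : Nat → Option String
  | 0 => none
  | k + 1 =>
    let candidate := PySem.Str.join "_" (tokens.take (k + 1))
    if candidate ∈ pvTemplateSet then some candidate else pvBScan tokens k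

def pvBPick (name : String) : String :=
  let tokens := (PySem.Str.split? name "_").getD []   -- name.split("_"); sep is the non-empty literal "_"
  match pvBScan tokens tokens.length with
  | some c => c
  | none => name

def cad_template_py_alt (part : List (String × String)) : String :=
  let explicit := (PySem.Dict.get? ⟨part⟩ "cad_template").getD ""
  if explicit ≠ "" then explicit
  else
    let name := (PySem.Dict.get? ⟨part⟩ "name").getD ""
    pvBPick name

-- ===== PRECONDITION & SPEC =====
def Spec_cad_template_py (part : List (String × String)) (out : String) : Prop := out = cad_template_py_alt part
instance (part : List (String × String)) (out : String) : Decidable (Spec_cad_template_py part out) := by unfold Spec_cad_template_py; infer_instance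

-- ===== CLAIM (what is proved, stated in full; the proofs are below) =====
def Claim_equal_cad_template_py : Prop := ∀ (part : List (String × String)), Dom_cad_template_py part → Spec_cad_template_py part (cad_template_py part)

-- ===== LEMMAS AND PROOFS =====

-- '_cad_template matches template' as a proposition on char lists
def pvMatches (name t : String) : Prop :=
  name = t ∨ (t.toList ++ ['_']) <+: name.toList

-- the k-token candidate, at char level
def pvCand (s : List Char) (k : Nat) : List Char :=
  List.intercalate ['_'] ((List.splitOn '_' s).take k)

lemma pvSplitOn_go_eq (fuel : Nat) (l cur : List Char) (acc : List (List Char))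
    (h : l.length ≤ fuel) :
    PySem.Chars.splitOn.go ['_'] fuel l cur acc
      = acc.reverse ++ List.splitOnP.go (fun c => c == '_') l cur := by
  induction fuel generalizing l cur acc with
  | zero =>
    have : l = [] := List.eq_nil_of_length_eq_zero (Nat.le_zero.mp h)
    subst this
    simp [PySem.Chars.splitOn.go, List.splitOnP.go]
  | succ fuel ih =>
    cases l with
    | nil => simp [PySem.Chars.splitOn.go, List.splitOnP.go]
    | cons c rest =>
      by_cases hc : c = '_'
      · subst hc
        rw [PySem.Chars.splitOn.go]
        simp only [List.isPrefixOf]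
        rw [ih _ _ _ (by simpa using Nat.le_of_succ_le_succ h)]
        simp [List.splitOnP.go]
      · rw [PySem.Chars.splitOn.go]
        simp only [List.isPrefixOf]
        rw [if_neg (by simp; exact fun e => hc e.symm)]
        rw [ih _ _ _ (by simpa using Nat.le_of_succ_le_succ h)]
        simp [List.splitOnP.go, hc]

lemma pvSplitOn_eq (s : List Char) :
    PySem.Chars.splitOn s ['_'] = List.splitOn '_' s := by
  rw [PySem.Chars.splitOn, pvSplitOn_go_eq _ _ _ _ (by omega)]
  rfl

lemma pvSplitOn_append (a b : List Char) :
    List.splitOn '_' (a ++ '_' :: b) = List.splitOn '_' a ++ List.splitOn '_' b := by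
  induction a with
  | nil => simp [List.splitOn, List.splitOnP_cons]
  | cons c a ih =>
    by_cases hc : c = '_'
    · subst hc
      simp only [List.cons_append, List.splitOn, List.splitOnP_cons] at *
      simp [ih]
    · simp only [List.cons_append, List.splitOn, List.splitOnP_cons] at *
      rw [if_neg (by simp [hc]), if_neg (by simp [hc]), ih]
      rcases hne : List.splitOnP (fun x => x == '_') a with _ | ⟨h1, t1⟩
      · exact absurd hne (List.splitOnP_ne_nil _ _)
      · simp

lemma pvIntercalate_cons_cons (sep a b : List Char) (l : List (List Char)) :
    List.intercalate sep (a :: b :: l) = a ++ sep ++ List.intercalate sep (b :: l) := by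
  simp [List.intercalate, List.intersperse]

lemma pvIntercalate_cut (sep : List Char) (l : List (List Char)) (k : Nat)
    (h0 : 0 < k) (h1 : k < l.length) :
    List.intercalate sep l
      = List.intercalate sep (l.take k) ++ sep ++ List.intercalate sep (l.drop k) := by
  induction l generalizing k with
  | nil => simp at h1
  | cons a l ih =>
    cases k with
    | zero => omega
    | succ k =>
      cases k with
      | zero =>
        rcases l with _ | ⟨b, l⟩
        · simp at h1
        · simpa [List.intercalate] using pvIntercalate_cons_cons sep a b l
      | succ k =>
        rcases l with _ | ⟨b, l⟩
        · simp at h1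
        · rw [pvIntercalate_cons_cons]
          rw [ih (k+1) (by omega) (by simpa using Nat.lt_of_succ_lt_succ h1)]
          simp [List.take_succ_cons, List.intercalate]

lemma pvSplitOn_length_pos (s : List Char) : 1 ≤ (List.splitOn '_' s).length :=
  List.length_pos_iff.mpr (by simp only [List.splitOn]; exact List.splitOnP_ne_nil _ _)

lemma pvCand_matches (name : String) (k : Nat) (h1 : 1 ≤ k)
    (h2 : k ≤ (List.splitOn '_' name.toList).length) (t : String)
    (ht : t.toList = pvCand name.toList k) : pvMatches name t := by
  rcases Nat.lt_or_ge k (List.splitOn '_' name.toList).length with hlt | hge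
  · right
    have hcut := pvIntercalate_cut ['_'] (List.splitOn '_' name.toList) k (by omega) hlt
    rw [List.intercalate_splitOn] at hcut
    rw [ht]
    exact ⟨List.intercalate ['_'] ((List.splitOn '_' name.toList).drop k), by
      simpa [pvCand, List.append_assoc] using hcut.symm⟩
  · left
    have hk : k = (List.splitOn '_' name.toList).length := le_antisymm h2 hge
    apply String.toList_inj.mp
    rw [ht, pvCand, hk, List.take_length, List.intercalate_splitOn]

lemma pvMatches_cand (name t : String) (h : pvMatches name t) :
    ∃ k, 1 ≤ k ∧ k ≤ (List.splitOn '_' name.toList).length ∧ pvCand name.toList k = t.toList := by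
  rcases h with h | ⟨r, hr⟩
  · subst h
    refine ⟨(List.splitOn '_' name.toList).length, ?_, le_refl _, ?_⟩
    · exact pvSplitOn_length_pos _
    · rw [pvCand, List.take_length, List.intercalate_splitOn]
  · have hname : name.toList = t.toList ++ '_' :: r := by simpa using hr.symm
    have hsplit : List.splitOn '_' name.toList
        = List.splitOn '_' t.toList ++ List.splitOn '_' r := by
      rw [hname, pvSplitOn_append]
    refine ⟨(List.splitOn '_' t.toList).length, ?_, ?_, ?_⟩
    · exact pvSplitOn_length_pos _
    · rw [hsplit]
      simp
    · rw [pvCand, hsplit, List.take_left, List.intercalate_splitOn]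

lemma pvCand_length_mono (s : List Char) (i j : Nat) (h1 : 1 ≤ i) (h : i ≤ j)
    (h2 : j ≤ (List.splitOn '_' s).length) :
    (pvCand s i).length ≤ (pvCand s j).length := by
  rcases Nat.lt_or_ge i j with hlt | hge
  · have hlen : i < ((List.splitOn '_' s).take j).length := by
      simpa using Nat.lt_of_lt_of_le hlt (le_of_eq (min_eq_left h2).symm)
    have hcut := pvIntercalate_cut ['_'] ((List.splitOn '_' s).take j) i (by omega) hlen
    rw [List.take_take, min_eq_left (le_of_lt hlt)] at hcut
    rw [pvCand, pvCand, hcut]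
    simp
  · have : i = j := le_antisymm h hge
    subst this
    exact le_refl _

lemma pvMatches_prefix (name t : String) (h : pvMatches name t) : t.toList <+: name.toList := by
  rcases h with h | hp
  · subst h; exact List.prefix_refl _
  · exact (List.prefix_append _ _).trans hp

lemma pvMatches_eq_of_length (name t₁ t₂ : String) (m1 : pvMatches name t₁)
    (m2 : pvMatches name t₂) (hl : t₁.toList.length = t₂.toList.length) : t₁ = t₂ := by
  have p1 := pvMatches_prefix name t₁ m1
  have p2 := pvMatches_prefix name t₂ m2
  have := List.prefix_of_prefix_length_le p1 p2 (le_of_eq hl)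
  exact String.toList_inj.mp (this.eq_of_length hl)

lemma pvMatches_iff (name t : String) :
    (name = t ∨ PySem.Str.startswith name (t ++ "_")) ↔ pvMatches name t := by
  simp [pvMatches, PySem.Str.startswith, PySem.Chars.startswith, List.isPrefixOf_iff_prefix]

lemma pvAScan_none (name : String) (L : List String)
    (h : ∀ t ∈ L, ¬ pvMatches name t) : pvAScan name L = name := by
  induction L with
  | nil => rfl
  | cons t ts ih =>
    simp only [pvAScan]
    rw [if_neg ((not_congr (pvMatches_iff name t)).mpr (h t (List.mem_cons_self)))]
    exact ih (fun t' ht' => h t' (List.mem_cons_of_mem _ ht'))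

lemma pvAScan_finds (name c : String) (L : List String)
    (hsort : L.Pairwise (fun a b => b.toList.length ≤ a.toList.length))
    (hmem : c ∈ L) (hc : pvMatches name c)
    (hmax : ∀ t ∈ L, pvMatches name t →
      t.toList.length ≤ c.toList.length ∧ (t.toList.length = c.toList.length → t = c)) :
    pvAScan name L = c := by
  induction L with
  | nil => cases hmem
  | cons t ts ih =>
    rcases List.pairwise_cons.mp hsort with ⟨hhead, htail⟩
    by_cases hmatch : pvMatches name t
    · have ht : t = c := by
        rcases List.mem_cons.mp hmem with rfl | hc'
        · rfl
        · have h1 := hmax t (List.mem_cons_self) hmatch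
          exact h1.2 (le_antisymm h1.1 (hhead c hc'))
      simp only [pvAScan]
      rw [if_pos ((pvMatches_iff name t).mpr hmatch)]
      exact ht
    · have hc' : c ∈ ts := by
        rcases List.mem_cons.mp hmem with rfl | hc' <;> [exact absurd hc hmatch; exact hc']
      simp only [pvAScan]
      rw [if_neg ((not_congr (pvMatches_iff name t)).mpr hmatch)]
      exact ih htail hc' (fun t' ht' hm => hmax t' (List.mem_cons_of_mem _ ht') hm)

lemma pvBScan_none_iff (tokens : List String) (k : Nat) :
    pvBScan tokens k = none ↔
      ∀ j, 1 ≤ j → j ≤ k → PySem.Str.join "_" (tokens.take j) ∉ pvTemplateSet := by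
  induction k with
  | zero =>
    constructor
    · intro _ j h1 h0; exact absurd h1 (by omega)
    · intro _; rfl
  | succ k ih =>
    simp only [pvBScan]
    by_cases hcand : PySem.Str.join "_" (tokens.take (k + 1)) ∈ pvTemplateSet
    · simp only [hcand, if_pos]
      constructor
      · intro h; cases h
      · intro h; exact absurd hcand (h (k + 1) (by omega) (le_refl _))
    · rw [if_neg hcand, ih]
      constructor
      · intro h j h1 hj
        rcases Nat.lt_or_ge j (k + 1) with hlt | hge
        · exact h j h1 (by omega)
        · have : j = k + 1 := by omega
          subst this; exact hcand
      · intro h j h1 hj; exact h j h1 (by omega)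

lemma pvBScan_some (tokens : List String) (k : Nat) (c : String)
    (h : pvBScan tokens k = some c) :
    ∃ j, 1 ≤ j ∧ j ≤ k ∧ c = PySem.Str.join "_" (tokens.take j) ∧ c ∈ pvTemplateSet ∧
      ∀ i, j < i → i ≤ k → PySem.Str.join "_" (tokens.take i) ∉ pvTemplateSet := by
  induction k with
  | zero => cases h
  | succ k ih =>
    simp only [pvBScan] at h
    by_cases hcand : PySem.Str.join "_" (tokens.take (k + 1)) ∈ pvTemplateSet
    · rw [if_pos hcand] at h
      refine ⟨k + 1, by omega, le_refl _, (Option.some_inj.mp h).symm,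
        Option.some_inj.mp h ▸ hcand, ?_⟩
      intro i hi1 hi2; omega
    · rw [if_neg hcand] at h
      rcases ih h with ⟨j, h1, h2, h3, h4, h5⟩
      refine ⟨j, h1, by omega, h3, h4, ?_⟩
      intro i hi1 hi2
      rcases Nat.lt_or_ge i (k + 1) with hlt | hge
      · exact h5 i hi1 (by omega)
      · have : i = k + 1 := by omega
        subst this; exact hcand

lemma pvSep_toList : ("_" : String).toList = ['_'] := by decide

lemma pvTokens_toList (name : String) :
    (PySem.Str.split? name "_").getD []
      = (List.splitOn '_' name.toList).map String.ofList := by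
  simp [PySem.Str.split?, PySem.Chars.split?, pvSep_toList, pvSplitOn_eq]

lemma pvJoin_take_eq (name : String) (j : Nat) :
    (PySem.Str.join "_" (((PySem.Str.split? name "_").getD []).take j)).toList
      = pvCand name.toList j := by
  rw [pvTokens_toList, PySem.Str.join]
  simp [PySem.Chars.join, pvCand, pvSep_toList, ← List.map_take, List.map_map,
    Function.comp_def, String.toList_ofList]

lemma pvTokens_length (name : String) :
    ((PySem.Str.split? name "_").getD []).length = (List.splitOn '_' name.toList).length := by
  rw [pvTokens_toList]; simp

lemma pvMemSet_iff_mem_len (t : String) : t ∈ pvTemplateSet ↔ t ∈ pvTemplatesByLen := by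
  have h : t ∈ pvTemplateSet ↔
      t ∈ (["plastic_base", "ribbed_cover", "sheet_metal_box", "bracket", "screw",
        "motor_dummy", "pcb_dummy"] : List String) := by
    exact PySem.Set.mem_ofList ..
  rw [h, pvTemplatesByLen]
  simp only [List.mem_cons, List.not_mem_nil, or_false]
  tauto

lemma pvSorted : (pvTemplatesByLen).Pairwise (fun a b => b.toList.length ≤ a.toList.length) := by
  decide

lemma pvPick_eq (name : String) : pvAScan name pvTemplatesByLen = pvBPick name := by
  unfold pvBPick
  show pvAScan name pvTemplatesByLen =
    match pvBScan ((PySem.Str.split? name "_").getD [])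
        ((PySem.Str.split? name "_").getD []).length with
    | some c => c
    | none => name
  rcases hb : pvBScan ((PySem.Str.split? name "_").getD [])
      ((PySem.Str.split? name "_").getD []).length with _ | c

  · -- no candidate is a template: no template matches at all
    apply pvAScan_none
    intro t htL hm
    rcases pvMatches_cand name t hm with ⟨k, hk1, hk2, hk3⟩
    have hjoin : PySem.Str.join "_" (((PySem.Str.split? name "_").getD []).take k) = t := by
      apply String.toList_inj.mp
      rw [pvJoin_take_eq, hk3]
    have hset : t ∈ pvTemplateSet := (pvMemSet_iff_mem_len t).mpr htL
    rw [← hjoin] at hset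
    exact (pvBScan_none_iff _ _).mp hb k hk1 (by rw [pvTokens_length]; exact hk2) hset
  · rcases pvBScan_some _ _ _ hb with ⟨j, hj1, hj2, hj3, hj4, hj5⟩
    rw [pvTokens_length] at hj2
    have hcl : c.toList = pvCand name.toList j := by rw [hj3, pvJoin_take_eq]
    have hcm : pvMatches name c := pvCand_matches name j hj1 hj2 c hcl
    apply pvAScan_finds name c _ pvSorted ((pvMemSet_iff_mem_len c).mp hj4) hcm
    intro t htL hm
    rcases pvMatches_cand name t hm with ⟨i, hi1, hi2, hi3⟩
    have hij : i ≤ j := by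
      by_contra hgt
      have hjoin : PySem.Str.join "_" (((PySem.Str.split? name "_").getD []).take i) = t := by
        apply String.toList_inj.mp
        rw [pvJoin_take_eq, hi3]
      have hset : t ∈ pvTemplateSet := (pvMemSet_iff_mem_len t).mpr htL
      rw [← hjoin] at hset
      exact hj5 i (by omega) (by rw [pvTokens_length]; exact hi2) hset
    have hlen : t.toList.length ≤ c.toList.length := by
      rw [hcl, ← hi3]
      exact pvCand_length_mono name.toList i j hi1 hij hj2
    exact ⟨hlen, fun he => pvMatches_eq_of_length name t c hm hcm he⟩

-- ===== VERDICT (by name: the statement is the Claim_ definition above) =====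
theorem cad_template_py_spec : Claim_equal_cad_template_py := by
  intro part _
  unfold Spec_cad_template_py cad_template_py cad_template_py_alt
  by_cases h : ((PySem.Dict.get? ⟨part⟩ "cad_template").getD "" : String) ≠ "" <;>
    simp [h, pvPick_eq]
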